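-- pv_equiv track=rewrite | github.com/alisalaman/ur-agent | ai-agent-app/src/ai_agent/security/encryption.py | mask_ssn
-- ===== SOURCE A (Python) =====
-- def mask_ssn(ssn: str) -> str:
--     """Mask Social Security Number."""
--     digits = "".join(filter(str.isdigit, ssn))
--
--     if len(digits) != 9:
--         return "*" * len(ssn)
--
--     # Format: XXX-XX-XXXX, show only last 4 digits
--     "XXX-XX-" + digits[-4:]
--
--     # Restore original format
--     result = ssn
--     digit_index = 0
--     for i, char in enumerate(ssn):
--         if char.isdigit():
--             if digit_index < 5:
--                 result = result[:i] + "X" + result[i + 1 :]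
--             else:
--                 result = result[:i] + digits[digit_index] + result[i + 1 :]
--             digit_index += 1
--
--     return result
-- ===== SOURCE B (Python) =====
-- def mask_ssn(ssn: str) -> str:
--     """Mask Social Security Number."""
--     if sum(c.isdigit() for c in ssn) != 9:
--         return "*" * len(ssn)
--
--     # Walk the string from the END: copy characters verbatim until four
--     # digits have been seen, then every further digit becomes 'X'.
--     # (With exactly 9 digits, "all but the last four" = "the first five".)
--     out = []
--     kept = 0
--     for c in reversed(ssn):
--         if c.isdigit() and kept >= 4:
--             out.append("X")
--         else:
--             if c.isdigit():
--                 kept += 1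
--             out.append(c)
--     out.reverse()
--     return "".join(out)
-- ===== Notes on version B (the rewrite author's own statement) =====
-- stated objective: alternative
-- what changed: A walks left-to-right keeping a running digit index against a precomputed digit string and splices result[:i]+ch+result[i+1:] at each digit; B only counts the digits for the guard and then walks the string from the END, copying characters verbatim until four digits have been seen and masking every earlier digit, reversing the accumulator at the end -- no digit string, no index arithmetic, no splicing.
import Mathlib
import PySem

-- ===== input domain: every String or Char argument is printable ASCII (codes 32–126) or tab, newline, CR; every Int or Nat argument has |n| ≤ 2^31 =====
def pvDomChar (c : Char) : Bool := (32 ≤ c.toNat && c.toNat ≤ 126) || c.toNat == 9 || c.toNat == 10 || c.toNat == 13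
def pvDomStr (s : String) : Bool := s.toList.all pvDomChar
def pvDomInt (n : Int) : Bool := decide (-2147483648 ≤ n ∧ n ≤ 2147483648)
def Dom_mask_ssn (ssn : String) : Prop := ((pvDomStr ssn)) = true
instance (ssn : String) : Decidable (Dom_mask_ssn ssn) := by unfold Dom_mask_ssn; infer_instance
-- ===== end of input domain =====

-- B replaces A's left-to-right per-digit string splicing (driven by a precomputed digit string
-- and a running digit index) by a right-to-left walk that keeps the last four digits verbatim
-- and masks every earlier digit; return value proved equal on all inputs.

-- ===== PORT A =====
-- one loop step of A: state (result, digit_index), item (i, char)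
def maskStepA (ds : List Char) (st : List Char × Int) (p : Int × Char) : List Char × Int :=
  if PySem.Chars.isdigit p.2 then
    if st.2 < 5 then
      (PySem.List.slice st.1 none (some p.1) ++ ['X'] ++ PySem.List.slice st.1 (some (p.1 + 1)) none, st.2 + 1)
    else
      (PySem.List.slice st.1 none (some p.1) ++ [PySem.List.pyGetD ds st.2 ' '] ++ PySem.List.slice st.1 (some (p.1 + 1)) none, st.2 + 1)
  else st

def mask_ssn (ssn : String) : String :=
  let cs := ssn.toList
  let digits := cs.filter PySem.Chars.isdigit
  if digits.length ≠ 9 then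
    String.ofList (PySem.List.pyRepeat ['*'] (cs.length : Int))
  else
    -- (A's line '"XXX-XX-" + digits[-4:]' is a discarded expression with no effect)
    String.ofList (((PySem.List.enumerate cs 0).foldl (maskStepA digits) (cs, 0)).1)

-- ===== PORT B =====
-- walk the reversed characters with a count of digits already kept
def maskRevB : List Char → Nat → List Char
  | [], _ => []
  | c :: r, kept =>
    if PySem.Chars.isdigit c ∧ 4 ≤ kept then 'X' :: maskRevB r kept
    else if PySem.Chars.isdigit c then c :: maskRevB r (kept + 1)
    else c :: maskRevB r kept

def mask_ssn_alt (ssn : String) : String :=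
  let cs := ssn.toList
  if cs.countP PySem.Chars.isdigit ≠ 9 then
    String.ofList (PySem.List.pyRepeat ['*'] (cs.length : Int))
  else
    String.ofList (maskRevB cs.reverse 0).reverse

-- ===== PRECONDITION & SPEC =====
def Spec_mask_ssn (ssn : String) (out : String) : Prop := out = mask_ssn_alt ssn
instance (ssn : String) (out : String) : Decidable (Spec_mask_ssn ssn out) := by unfold Spec_mask_ssn; infer_instance

-- ===== CLAIM (what is proved, stated in full; the proofs are below) =====
def Claim_equal_mask_ssn : Prop := ∀ (ssn : String), Dom_mask_ssn ssn → Spec_mask_ssn ssn (mask_ssn ssn)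

-- ===== LEMMAS AND PROOFS =====

-- reference shape: mask the next m digits with 'X', keep the rest
def specGo : List Char → Nat → List Char
  | [], _ => []
  | c :: cs, m =>
    if PySem.Chars.isdigit c then (if m ≠ 0 then 'X' else c) :: specGo cs (m - 1)
    else c :: specGo cs m

theorem loopA_eq_spec (ds : List Char) (suf : List Char) :
    ∀ (acc : List Char) (di : Int), 0 ≤ di →
      ds.drop di.toNat = suf.filter PySem.Chars.isdigit →
      ((PySem.List.enumerate suf (acc.length : Int)).foldl (maskStepA ds) (acc ++ suf, di)).1
        = acc ++ specGo suf (5 - di).toNat := by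
  induction suf with
  | nil => intro acc di h0 hd; simp [PySem.List.enumerate_nil, specGo]
  | cons c suf ih =>
    intro acc di h0 hd
    rw [PySem.List.enumerate_cons, List.foldl_cons]
    by_cases hc : PySem.Chars.isdigit c
    · have hfil : (c :: suf).filter PySem.Chars.isdigit = c :: suf.filter PySem.Chars.isdigit := by
        simp [hc]
      rw [hfil] at hd
      have htake : PySem.List.slice (acc ++ c :: suf) none (some (acc.length : Int)) = acc := by
        rw [PySem.List.slice_to_natCast]; simp
      have hdrop : PySem.List.slice (acc ++ c :: suf) (some ((acc.length : Int) + 1)) none = suf := by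
        have : ((acc.length : Int) + 1) = ((acc.length + 1 : Nat) : Int) := by push_cast; ring
        rw [this, PySem.List.slice_from_natCast]
        have : acc ++ c :: suf = (acc ++ [c]) ++ suf := by simp
        rw [this, List.drop_left' (by simp)]
      have hget : PySem.List.pyGetD ds di ' ' = c := by
        have hdi : di = ((di.toNat : Nat) : Int) := (Int.toNat_of_nonneg h0).symm
        rw [hdi, PySem.List.pyGetD_natCast]
        have h2 : (ds.drop di.toNat)[0]? = some c := by rw [hd]; rfl
        rw [List.getElem?_drop] at h2
        simp only [Nat.add_zero] at h2
        simp [List.getD_eq_getElem?_getD, h2]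
      have hd' : ds.drop (di + 1).toNat = suf.filter PySem.Chars.isdigit := by
        have : (di + 1).toNat = di.toNat + 1 := by omega
        rw [this, ← List.drop_drop, hd]; simp
      by_cases h5 : di < 5
      · have : maskStepA ds (acc ++ c :: suf, di) ((acc.length : Int), c)
            = ((acc ++ ['X']) ++ suf, di + 1) := by
          simp [maskStepA, hc, h5, htake, hdrop]
        rw [this]
        have ihh := ih (acc ++ ['X']) (di + 1) (by omega) hd'
        have hlen : ((acc ++ ['X']).length : Int) = (acc.length : Int) + 1 := by simp
        rw [hlen] at ihh
        rw [ihh]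
        have hm : (5 - di).toNat ≠ 0 := by omega
        have hm2 : (5 - (di + 1)).toNat = (5 - di).toNat - 1 := by omega
        simp [specGo, hc, hm, hm2]
      · have : maskStepA ds (acc ++ c :: suf, di) ((acc.length : Int), c)
            = ((acc ++ [c]) ++ suf, di + 1) := by
          simp [maskStepA, hc, h5, htake, hdrop, hget]
        rw [this]
        have ihh := ih (acc ++ [c]) (di + 1) (by omega) hd'
        have hlen : ((acc ++ [c]).length : Int) = (acc.length : Int) + 1 := by simp
        rw [hlen] at ihh
        rw [ihh]
        have hm : ¬ (5 - di).toNat ≠ 0 := by omega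
        have hm2 : (5 - (di + 1)).toNat = (5 - di).toNat - 1 := by omega
        simp [specGo, hc, hm, hm2]
    · have hfil : (c :: suf).filter PySem.Chars.isdigit = suf.filter PySem.Chars.isdigit := by
        simp [hc]
      rw [hfil] at hd
      have : maskStepA ds (acc ++ c :: suf, di) ((acc.length : Int), c)
          = ((acc ++ [c]) ++ suf, di) := by
        simp [maskStepA, hc]
      rw [this]
      have ihh := ih (acc ++ [c]) di h0 hd
      have hlen : ((acc ++ [c]).length : Int) = (acc.length : Int) + 1 := by simp
      rw [hlen] at ihh
      rw [ihh]
      simp [specGo, hc]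

-- appending one character on the right of specGo's input
theorem specGo_append_single (c : Char) :
    ∀ (l : List Char) (m : Nat),
      specGo (l ++ [c]) m
        = specGo l m ++ [if PySem.Chars.isdigit c then
            (if m - l.countP PySem.Chars.isdigit ≠ 0 then 'X' else c) else c] := by
  intro l
  induction l with
  | nil => intro m; by_cases hc : PySem.Chars.isdigit c <;> simp [specGo, hc]
  | cons d l ih =>
    intro m
    by_cases hd : PySem.Chars.isdigit d
    · have h1 : (m - 1) - l.countP PySem.Chars.isdigit = m - (d :: l).countP PySem.Chars.isdigit := by
        simp [hd]; omega
      simp only [List.cons_append, specGo, hd, if_pos, ih (m - 1), h1]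
    · simp only [List.cons_append, specGo, if_neg hd, ih m, List.countP_cons]
      simp

-- digits never masked once the counter is exhausted relative to the digit count
theorem specGo_all (l : List Char) :
    ∀ m m' : Nat, l.countP PySem.Chars.isdigit ≤ m → l.countP PySem.Chars.isdigit ≤ m' →
      specGo l m = specGo l m' := by
  induction l with
  | nil => intro m m' _ _; rfl
  | cons c l ih =>
    intro m m' h1 h2
    by_cases hc : PySem.Chars.isdigit c
    · simp only [List.countP_cons, hc, if_pos] at h1 h2
      have hm : m ≠ 0 := by omega
      have hm' : m' ≠ 0 := by omega
      simp only [specGo, hc, if_pos, hm, hm', ne_eq]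
      exact congrArg _ (ih (m - 1) (m' - 1) (by omega) (by omega))
    · simp only [List.countP_cons, hc] at h1 h2
      simp only [specGo, if_neg hc]
      rw [ih m m' (by simpa using h1) (by simpa using h2)]

-- the reverse walk equals masking the first (count − (4 − kept)) digits of the reversed input
theorem maskRevB_eq_spec :
    ∀ (r : List Char) (k : Nat),
      (maskRevB r k).reverse = specGo r.reverse (r.countP PySem.Chars.isdigit - (4 - k)) := by
  intro r
  induction r with
  | nil => intro k; rfl
  | cons c r ih =>
    intro k
    have hcnt : r.reverse.countP PySem.Chars.isdigit = r.countP PySem.Chars.isdigit := by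
      simp
    by_cases hc : PySem.Chars.isdigit c
    · by_cases hk : 4 ≤ k
      · have hstep : maskRevB (c :: r) k = 'X' :: maskRevB r k := by
          simp [maskRevB, hc, hk]
        rw [hstep, List.reverse_cons, ih k, List.reverse_cons,
          specGo_append_single, hcnt]
        have h4 : (4 - k) = 0 := by omega
        have hcc : (c :: r).countP PySem.Chars.isdigit = r.countP PySem.Chars.isdigit + 1 := by
          simp [hc]
        rw [h4, hcc]
        have hne : (r.countP PySem.Chars.isdigit + 1 - 0) - r.countP PySem.Chars.isdigit ≠ 0 := by omega
        rw [if_pos hc, if_pos hne]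
        have := specGo_all r.reverse (r.countP PySem.Chars.isdigit - 0)
          (r.countP PySem.Chars.isdigit + 1 - 0) (by rw [hcnt]; omega) (by rw [hcnt]; omega)
        rw [this]
      · have hstep : maskRevB (c :: r) k = c :: maskRevB r (k + 1) := by
          simp [maskRevB, hc, hk]
        rw [hstep, List.reverse_cons, ih (k + 1), List.reverse_cons,
          specGo_append_single, hcnt]
        have hcc : (c :: r).countP PySem.Chars.isdigit = r.countP PySem.Chars.isdigit + 1 := by
          simp [hc]
        rw [hcc]
        have hm : r.countP PySem.Chars.isdigit + 1 - (4 - k)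
            = r.countP PySem.Chars.isdigit - (4 - (k + 1)) := by omega
        have hz : (r.countP PySem.Chars.isdigit + 1 - (4 - k)) - r.countP PySem.Chars.isdigit = 0 := by
          omega
        rw [hm, if_pos hc, hm.symm, hz]
        simp
    · have hstep : maskRevB (c :: r) k = c :: maskRevB r k := by
        simp [maskRevB, hc]
      rw [hstep, List.reverse_cons, ih k, List.reverse_cons,
        specGo_append_single]
      have hcc : (c :: r).countP PySem.Chars.isdigit = r.countP PySem.Chars.isdigit := by
        simp [hc]
      rw [hcc, if_neg hc]

-- ===== VERDICT (by name: the statement is the Claim_ definition above) =====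
theorem mask_ssn_spec : Claim_equal_mask_ssn := by
  intro ssn _
  unfold Spec_mask_ssn mask_ssn mask_ssn_alt
  set cs := ssn.toList with hcs
  have hcount : cs.countP PySem.Chars.isdigit = (cs.filter PySem.Chars.isdigit).length := by
    simp [List.countP_eq_length_filter]
  by_cases h : (cs.filter PySem.Chars.isdigit).length = 9
  · simp only [h, hcount, ne_eq, not_true_eq_false, if_false]
    have hA := loopA_eq_spec (cs.filter PySem.Chars.isdigit) cs [] 0 le_rfl (by simp)
    simp only [List.length_nil, Nat.cast_zero, List.nil_append] at hA
    have hB := maskRevB_eq_spec cs.reverse 0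
    rw [List.reverse_reverse] at hB
    have hcnt : cs.reverse.countP PySem.Chars.isdigit = 9 := by
      simp [hcount, h]
    rw [hcnt] at hB
    rw [hA, hB]
    norm_num [Int.toNat]
  · simp only [h, hcount, ne_eq, not_false_eq_true, if_true]
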